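-- pv_equiv track=rewrite | github.com/Orchidocx/ics-data-conversion-py | dateProgram.py | stringifyDate
-- ===== SOURCE A (Python) =====
-- def stringifyDate(year, month, day):
--     while (month < 1 or month > 12):
--         if (month > 12):
--             year+=1
--             month-=12
--         elif(month < 1):
--             year-=1
--             month+=12
--     daysInMonth = getDaysInMonth(month, year)
--     while(day < 1 or day > daysInMonth):
--         if(day > daysInMonth):
--             month+=1
--             day-=daysInMonth
--             year = updateYear(month, year)
--             month = updateMonth(month)
--             daysInMonth = getDaysInMonth(month, year)
--         elif(day < 1):
--             month-=1
--             year = updateYear(month, year)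
--             month = updateMonth(month)
--             daysInMonth = getDaysInMonth(month, year)
--             day+=daysInMonth
--     return "{:04d}{:02d}{:02d}".format(year, month, day)
--
-- def updateMonth(month):
--     while (month < 1 or month > 12):
--         if (month > 12):
--             month-=12
--         elif(month < 1):
--             month+=12
--     return month
--
-- def updateYear(month, year):
--     while (month < 1 or month > 12):
--         if (month > 12):
--             year+=1
--         elif(month < 1):
--             year-=1
--     return year
--
-- def getDaysInMonth(month, year):
--     daysInMonth = {
--         1: 31,
--         2: 29 if (year%4) == 0 else 28,
--         3: 31,
--         4: 30,
--         5: 31,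
--         6: 30,
--         7: 31,
--         8: 31,
--         9: 30,
--         10: 31,
--         11: 30,
--         12: 31
--     }
--     return daysInMonth[month]
-- ===== SOURCE B (Python) =====
-- _DAYS = [31, 28, 31, 30, 31, 30, 31, 31, 30, 31, 30, 31]
--
--
-- def _dim(month, year):
--     if month == 2 and year % 4 == 0:
--         return 29
--     return _DAYS[month - 1]
--
--
-- def stringifyDate(year, month, day):
--     # Normalize the month in one step instead of a +-12 loop.
--     q, r = divmod(month - 1, 12)
--     year += q
--     month = r + 1
--     # Work with a day-of-year offset; roll whole years, then scan the 12 months.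
--     doy = day
--     for m in range(1, month):
--         doy += _dim(m, year)
--     while doy < 1:
--         year -= 1
--         doy += 366 if year % 4 == 0 else 365
--     yl = 366 if year % 4 == 0 else 365
--     while doy > yl:
--         doy -= yl
--         year += 1
--         yl = 366 if year % 4 == 0 else 365
--     month = 1
--     while doy > _dim(month, year):
--         doy -= _dim(month, year)
--         month += 1
--     return "{:04d}{:02d}{:02d}".format(year, month, doy)
-- ===== Notes on version B (the rewrite author's own statement) =====
-- stated objective: alternative
-- what changed: Month normalization becomes a single divmod instead of a +-12-at-a-time loop, and the day is normalized via a day-of-year offset (whole-year rolls, then one 12-month scan) instead of month-by-month borrowing with per-step helper loops; Pre_ excludes the inputs (day overflow/underflow crossing a year boundary) on which A's updateYear while-loop never terminates, where B returns the correctly normalized date.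
import Mathlib
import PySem

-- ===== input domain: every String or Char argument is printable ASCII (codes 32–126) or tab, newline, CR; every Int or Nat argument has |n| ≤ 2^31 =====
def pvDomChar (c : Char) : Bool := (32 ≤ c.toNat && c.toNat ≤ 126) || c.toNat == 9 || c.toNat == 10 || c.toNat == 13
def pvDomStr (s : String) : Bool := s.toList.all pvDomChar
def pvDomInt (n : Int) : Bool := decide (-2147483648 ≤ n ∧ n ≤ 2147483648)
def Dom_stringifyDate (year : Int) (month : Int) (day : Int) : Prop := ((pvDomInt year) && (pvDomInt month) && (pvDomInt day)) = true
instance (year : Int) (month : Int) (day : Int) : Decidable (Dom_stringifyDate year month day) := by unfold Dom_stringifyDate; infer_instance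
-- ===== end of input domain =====

-- B replaces A's ±12-at-a-time month loop by one divmod and A's month-by-month day borrowing by a
-- day-of-year offset (objective: alternative); Pre_ excludes the inputs on which A's updateYear loop diverges.

-- ===== PORT A =====
-- "{:04d}".format(n) / "{:02d}".format(n): zero-pad to width, sign counted in the width.
def pyPad (w : Nat) (n : Int) : String :=
  let s := PySem.Int.toChars n
  if n < 0 then String.ofList ('-' :: (List.replicate (w - s.length) '0' ++ s.tail))
  else String.ofList (List.replicate (w - s.length) '0' ++ s)

-- dict lookup of A's getDaysInMonth; month is 1..12 at every call site (KeyError unreachable there).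
def getDaysInMonth (month : Int) (year : Int) : Int :=
  if month = 1 then 31
  else if month = 2 then (if PySem.Int.mod year 4 = 0 then 29 else 28)
  else if month = 3 then 31 else if month = 4 then 30 else if month = 5 then 31
  else if month = 6 then 30 else if month = 7 then 31 else if month = 8 then 31
  else if month = 9 then 30 else if month = 10 then 31 else if month = 11 then 30
  else if month = 12 then 31 else 0

-- A's updateMonth while-loop, fueled (the fuel only totalizes the port).
def updateMonthF : Nat → Int → Int
  | 0, m => m
  | f + 1, m => if m > 12 then updateMonthF f (m - 12) else if m < 1 then updateMonthF f (m + 12) else m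

-- A's updateYear while-loop: month never changes inside it, so in Python it runs 0 times (month in 1..12)
-- or FOREVER (month outside 1..12; outside Pre_). Fuel 1 totalizes the port; exact wherever Python returns.
def updateYearF : Nat → Int → Int → Int
  | 0, _, y => y
  | f + 1, m, y => if m > 12 then updateYearF f m (y + 1) else if m < 1 then updateYearF f m (y - 1) else y

-- A's first while-loop (month normalization), fueled; fuel month.natAbs + 2 always suffices.
def aMonthLoop : Nat → Int → Int → Int × Int
  | 0, y, m => (y, m)
  | f + 1, y, m =>
    if m > 12 then aMonthLoop f (y + 1) (m - 12)
    else if m < 1 then aMonthLoop f (y - 1) (m + 12)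
    else (y, m)

-- A's second while-loop (day normalization), fueled; on Pre_ it runs at most 11 iterations, so fuel 24 suffices.
def aDayLoop : Nat → Int → Int → Int → Int → Int × Int × Int
  | 0, y, m, d, _ => (y, m, d)
  | f + 1, y, m, d, dim =>
    if d > dim then
      aDayLoop f (updateYearF 1 (m + 1) y) (updateMonthF 1 (m + 1)) (d - dim)
        (getDaysInMonth (updateMonthF 1 (m + 1)) (updateYearF 1 (m + 1) y))
    else if d < 1 then
      aDayLoop f (updateYearF 1 (m - 1) y) (updateMonthF 1 (m - 1))
        (d + getDaysInMonth (updateMonthF 1 (m - 1)) (updateYearF 1 (m - 1) y))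
        (getDaysInMonth (updateMonthF 1 (m - 1)) (updateYearF 1 (m - 1) y))
    else (y, m, d)

def stringifyDate (year : Int) (month : Int) (day : Int) : String :=
  let p := aMonthLoop (month.natAbs + 2) year month
  let dim := getDaysInMonth p.2 p.1
  let t := aDayLoop 24 p.1 p.2 day dim
  pyPad 4 t.1 ++ pyPad 2 t.2.1 ++ pyPad 2 t.2.2

-- ===== PORT B =====
-- Source B's _dim; the list index month-1 is 0..11 at every call site of B.
def dimAlt (month : Int) (year : Int) : Int :=
  if month = 2 ∧ PySem.Int.mod year 4 = 0 then 29
  else PySem.List.pyGetD [31, 28, 31, 30, 31, 30, 31, 31, 30, 31, 30, 31] (month - 1) 0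

-- Source B's `while doy < 1` year roll (fueled; runs 0 times on Pre_).
def bYearDown : Nat → Int → Int → Int × Int
  | 0, y, doy => (y, doy)
  | f + 1, y, doy =>
    if doy < 1 then bYearDown f (y - 1) (doy + (if PySem.Int.mod (y - 1) 4 = 0 then 366 else 365))
    else (y, doy)

-- Source B's `while doy > yl` year roll (fueled; runs 0 times on Pre_).
def bYearUp : Nat → Int → Int → Int → Int × Int
  | 0, y, doy, _ => (y, doy)
  | f + 1, y, doy, yl =>
    if doy > yl then bYearUp f (y + 1) (doy - yl) (if PySem.Int.mod (y + 1) 4 = 0 then 366 else 365)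
    else (y, doy)

-- Source B's final month scan (at most 11 iterations; fuel 12 suffices).
def bMonthScan : Nat → Int → Int → Int → Int × Int
  | 0, _, m, doy => (m, doy)
  | f + 1, y, m, doy =>
    if doy > dimAlt m y then bMonthScan f y (m + 1) (doy - dimAlt m y) else (m, doy)

def stringifyDate_alt (year : Int) (month : Int) (day : Int) : String :=
  let q := PySem.Int.floordiv (month - 1) 12
  let r := PySem.Int.mod (month - 1) 12
  let year1 := year + q
  let month1 := r + 1
  let doy0 := (PySem.List.pyRange 1 month1 1).foldl (fun acc m => acc + dimAlt m year1) day
  let p := bYearDown (doy0.natAbs + 1) year1 doy0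
  let yl := if PySem.Int.mod p.1 4 = 0 then 366 else 365
  let u := bYearUp (p.2.natAbs + 1) p.1 p.2 yl
  let s := bMonthScan 12 u.1 1 u.2
  pyPad 4 u.1 ++ pyPad 2 s.1 ++ pyPad 2 s.2

-- ===== PRECONDITION & SPEC =====
-- helpers of Pre_ only (independent of both ports): days in month / cumulative days / year length
def pvDim (y : Int) (m : Int) : Int :=
  if m = 2 ∧ PySem.Int.mod y 4 = 0 then 29
  else if m = 1 ∨ m = 3 ∨ m = 5 ∨ m = 7 ∨ m = 8 ∨ m = 10 ∨ m = 12 then 31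
  else if m = 2 then 28 else 30

def pvCum (y : Int) (m : Int) : Int :=
  (if 1 < m then pvDim y 1 else 0) + (if 2 < m then pvDim y 2 else 0) + (if 3 < m then pvDim y 3 else 0) +
  (if 4 < m then pvDim y 4 else 0) + (if 5 < m then pvDim y 5 else 0) + (if 6 < m then pvDim y 6 else 0) +
  (if 7 < m then pvDim y 7 else 0) + (if 8 < m then pvDim y 8 else 0) + (if 9 < m then pvDim y 9 else 0) +
  (if 10 < m then pvDim y 10 else 0) + (if 11 < m then pvDim y 11 else 0) + (if 12 < m then pvDim y 12 else 0)

def pvYearLen (y : Int) : Int := if PySem.Int.mod y 4 = 0 then 366 else 365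

-- Pre_ excludes exactly the inputs on which A DIVERGES: after month normalization, if the day pushes the
-- date across a year boundary, A's updateYear loop (whose condition never changes) never terminates.
def Pre_stringifyDate (year : Int) (month : Int) (day : Int) : Prop :=
  1 ≤ day + pvCum (year + PySem.Int.floordiv (month - 1) 12) (PySem.Int.mod (month - 1) 12 + 1) ∧
  day + pvCum (year + PySem.Int.floordiv (month - 1) 12) (PySem.Int.mod (month - 1) 12 + 1) ≤
    pvYearLen (year + PySem.Int.floordiv (month - 1) 12)
instance (year : Int) (month : Int) (day : Int) : Decidable (Pre_stringifyDate year month day) := by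
  unfold Pre_stringifyDate; infer_instance

def pvWitness_stringifyDate : Int × Int × Int := (2020, 14, 40)

def Spec_stringifyDate (year : Int) (month : Int) (day : Int) (out : String) : Prop := out = stringifyDate_alt year month day
instance (year : Int) (month : Int) (day : Int) (out : String) : Decidable (Spec_stringifyDate year month day out) := by unfold Spec_stringifyDate; infer_instance

-- ===== CLAIM (what is proved, stated in full; the proofs are below) =====
def Claim_equal_stringifyDate : Prop := ∀ (year : Int) (month : Int) (day : Int), Dom_stringifyDate year month day → Pre_stringifyDate year month day → Spec_stringifyDate year month day (stringifyDate year month day)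

-- ===== LEMMAS AND PROOFS =====

theorem aMonthLoop_eq (f : Nat) (y m : Int)
    (hf : (if m > 12 then ((m - 1) / 12).toNat else if m < 1 then ((12 - m) / 12).toNat else 0) ≤ f) :
    aMonthLoop f y m = (y + PySem.Int.floordiv (m - 1) 12, PySem.Int.mod (m - 1) 12 + 1) := by
  rw [PySem.Int.floordiv_eq_ediv_of_pos (by norm_num : (0:Int) < 12),
      PySem.Int.mod_eq_emod_of_pos (by norm_num : (0:Int) < 12)]
  induction f generalizing y m with
  | zero =>
    split_ifs at hf with h1 h2
    · omega
    · omega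
    · simp only [aMonthLoop, Prod.mk.injEq]; constructor <;> omega
  | succ f ih =>
    by_cases h1 : m > 12
    · rw [if_pos h1] at hf
      simp only [aMonthLoop]; rw [if_pos h1]
      rw [ih (y + 1) (m - 12) (by split_ifs <;> omega)]
      simp only [Prod.mk.injEq]; constructor <;> omega
    · by_cases h2 : m < 1
      · rw [if_neg h1, if_pos h2] at hf
        simp only [aMonthLoop]; rw [if_neg h1, if_pos h2]
        rw [ih (y - 1) (m + 12) (by split_ifs <;> omega)]
        simp only [Prod.mk.injEq]; constructor <;> omega
      · simp only [aMonthLoop]; rw [if_neg h1, if_neg h2]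
        simp only [Prod.mk.injEq]; constructor <;> omega


theorem dim_eq_A (y m : Int) (h1 : 1 ≤ m) (h2 : m ≤ 12) : getDaysInMonth m y = pvDim y m := by
  interval_cases m <;> simp [getDaysInMonth, pvDim]


theorem dim_eq_B (y m : Int) (h1 : 1 ≤ m) (h2 : m ≤ 12) : dimAlt m y = pvDim y m := by
  interval_cases m <;> simp [dimAlt, pvDim, PySem.List.pyGetD]


theorem pvDim_pos (y m : Int) : 0 < pvDim y m := by
  unfold pvDim; split_ifs <;> norm_num


theorem pvCum_one (y : Int) : pvCum y 1 = 0 := by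
  norm_num [pvCum]


theorem pvCum_succ (y m : Int) (h1 : 1 ≤ m) (h2 : m ≤ 12) : pvCum y (m + 1) = pvCum y m + pvDim y m := by
  interval_cases m <;> norm_num [pvCum]


theorem pvCum_year (y : Int) : pvCum y 13 = pvYearLen y := by
  simp only [pvCum, pvDim, pvYearLen]; norm_num; split_ifs <;> norm_num


theorem pvCum_mono (y : Int) {a b : Int} (hab : a ≤ b) : pvCum y a ≤ pvCum y b := by
  have hd : ∀ k : Int, 0 ≤ pvDim y k := fun k => le_of_lt (pvDim_pos y k)
  unfold pvCum
  repeat' apply add_le_add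
  all_goals
    split_ifs with hx hy
    · exact le_refl _
    · exact absurd (lt_of_lt_of_le hx hab) hy
    · exact hd _
    · exact le_refl _


-- uniqueness of the (month, day) representation of a day-of-year value
theorem dspec_unique (y m d m' d' : Int)
    (h1 : 1 ≤ m) (h2 : m ≤ 12) (h3 : 1 ≤ d) (h4 : d ≤ pvDim y m)
    (h5 : 1 ≤ m') (h6 : m' ≤ 12) (h7 : 1 ≤ d') (h8 : d' ≤ pvDim y m')
    (heq : pvCum y m + d = pvCum y m' + d') : m = m' ∧ d = d' := by
  rcases lt_trichotomy m m' with h | h | h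
  · exfalso
    have hstep := pvCum_succ y m h1 h2
    have hmono := pvCum_mono y (show m + 1 ≤ m' by omega)
    omega
  · subst h; omega
  · exfalso
    have hstep := pvCum_succ y m' h5 h6
    have hmono := pvCum_mono y (show m' + 1 ≤ m by omega)
    omega


theorem updateMonthF_id (f : Nat) (m : Int) (h1 : 1 ≤ m) (h2 : m ≤ 12) : updateMonthF f m = m := by
  cases f with
  | zero => rfl
  | succ f => simp only [updateMonthF]; rw [if_neg (by omega), if_neg (by omega)]


theorem updateYearF_id (f : Nat) (m y : Int) (h1 : 1 ≤ m) (h2 : m ≤ 12) : updateYearF f m y = y := by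
  cases f with
  | zero => rfl
  | succ f => simp only [updateYearF]; rw [if_neg (by omega), if_neg (by omega)]


theorem aDayLoop_exit (f : Nat) (y m d dim : Int) (h1 : 1 ≤ d) (h2 : ¬ d > dim) :
    aDayLoop f y m d dim = (y, m, d) := by
  cases f with
  | zero => rfl
  | succ f => simp only [aDayLoop]; rw [if_neg h2, if_neg (by omega)]


theorem aDayLoop_spec (f : Nat) (y : Int) : ∀ (m d : Int),
    (if 1 ≤ d then (12 - m).toNat else m.toNat) ≤ f → 1 ≤ m → m ≤ 12 →
    1 ≤ pvCum y m + d → pvCum y m + d ≤ pvYearLen y →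
    ∃ m' d', aDayLoop f y m d (getDaysInMonth m y) = (y, m', d') ∧
      1 ≤ m' ∧ m' ≤ 12 ∧ 1 ≤ d' ∧ d' ≤ pvDim y m' ∧ pvCum y m' + d' = pvCum y m + d := by
  induction f with
  | zero =>
    intro m d hf h1 h2 hlo hhi
    split_ifs at hf with hd1
    · have hm : m = 12 := by omega
      subst hm
      have hstep := pvCum_succ y 12 (by norm_num) le_rfl
      norm_num at hstep
      have hyr := pvCum_year y
      exact ⟨12, d, rfl, by norm_num, le_rfl, hd1, by omega, rfl⟩
    · omega
  | succ f ih =>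
    intro m d hf h1 h2 hlo hhi
    have hdim := dim_eq_A y m h1 h2
    have hdpos := pvDim_pos y m
    simp only [aDayLoop]
    by_cases hgt : d > getDaysInMonth m y
    · rw [if_pos hgt]
      have hstep := pvCum_succ y m h1 h2
      have hm12 : m < 12 := by
        by_contra hc
        have hm : m = 12 := by omega
        subst hm
        norm_num at hstep
        have hyr := pvCum_year y
        omega
      rw [updateYearF_id 1 (m + 1) y (by omega) (by omega),
          updateMonthF_id 1 (m + 1) (by omega) (by omega)]
      have hfu : (if 1 ≤ d - getDaysInMonth m y then (12 - (m + 1)).toNat else (m + 1).toNat) ≤ f := by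
        rw [if_pos (by omega)] at hf ⊢
        omega
      obtain ⟨m', d', heq, ha, hb, hc, hd, he⟩ :=
        ih (m + 1) (d - getDaysInMonth m y) hfu (by omega) (by omega) (by omega) (by omega)
      exact ⟨m', d', heq, ha, hb, hc, hd, by omega⟩
    · by_cases hlt : d < 1
      · rw [if_neg hgt, if_pos hlt]
        have hm2 : 2 ≤ m := by
          by_contra hc
          have hm : m = 1 := by omega
          subst hm
          have h0 := pvCum_one y
          omega
        rw [updateYearF_id 1 (m - 1) y (by omega) (by omega),
            updateMonthF_id 1 (m - 1) (by omega) (by omega)]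
        have hdim' := dim_eq_A y (m - 1) (by omega) (by omega)
        have hstep := pvCum_succ y (m - 1) (by omega) (by omega)
        rw [show m - 1 + 1 = m by omega] at hstep
        by_cases hpos : 1 ≤ d + getDaysInMonth (m - 1) y
        · rw [aDayLoop_exit f y (m - 1) _ _ hpos (by omega)]
          exact ⟨m - 1, d + getDaysInMonth (m - 1) y, rfl, by omega, by omega, hpos, by omega, by omega⟩
        · have hfu : (if 1 ≤ d + getDaysInMonth (m - 1) y then (12 - (m - 1)).toNat else (m - 1).toNat) ≤ f := by
            rw [if_neg hpos]
            rw [if_neg (by omega)] at hf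
            omega
          obtain ⟨m', d', heq, ha, hb, hc, hd, he⟩ :=
            ih (m - 1) (d + getDaysInMonth (m - 1) y) hfu (by omega) (by omega) (by omega) (by omega)
          exact ⟨m', d', heq, ha, hb, hc, hd, by omega⟩
      · rw [if_neg hgt, if_neg hlt]
        exact ⟨m, d, rfl, h1, h2, by omega, by omega, rfl⟩


theorem bDoy_eq (y day : Int) (m : Int) (h1 : 1 ≤ m) (h2 : m ≤ 12) :
    (PySem.List.pyRange 1 m 1).foldl (fun acc k => acc + dimAlt k y) day = day + pvCum y m := by
  have hA1 := dim_eq_B y 1 (by norm_num) (by norm_num)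
  have hA2 := dim_eq_B y 2 (by norm_num) (by norm_num)
  have hA3 := dim_eq_B y 3 (by norm_num) (by norm_num)
  have hA4 := dim_eq_B y 4 (by norm_num) (by norm_num)
  have hA5 := dim_eq_B y 5 (by norm_num) (by norm_num)
  have hA6 := dim_eq_B y 6 (by norm_num) (by norm_num)
  have hA7 := dim_eq_B y 7 (by norm_num) (by norm_num)
  have hA8 := dim_eq_B y 8 (by norm_num) (by norm_num)
  have hA9 := dim_eq_B y 9 (by norm_num) (by norm_num)
  have hA10 := dim_eq_B y 10 (by norm_num) (by norm_num)
  have hA11 := dim_eq_B y 11 (by norm_num) (by norm_num)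
  interval_cases m <;>
    simp only [show PySem.List.pyRange 1 1 1 = ([] : List Int) from by decide,
      show PySem.List.pyRange 1 2 1 = ([1] : List Int) from by decide,
      show PySem.List.pyRange 1 3 1 = ([1, 2] : List Int) from by decide,
      show PySem.List.pyRange 1 4 1 = ([1, 2, 3] : List Int) from by decide,
      show PySem.List.pyRange 1 5 1 = ([1, 2, 3, 4] : List Int) from by decide,
      show PySem.List.pyRange 1 6 1 = ([1, 2, 3, 4, 5] : List Int) from by decide,
      show PySem.List.pyRange 1 7 1 = ([1, 2, 3, 4, 5, 6] : List Int) from by decide,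
      show PySem.List.pyRange 1 8 1 = ([1, 2, 3, 4, 5, 6, 7] : List Int) from by decide,
      show PySem.List.pyRange 1 9 1 = ([1, 2, 3, 4, 5, 6, 7, 8] : List Int) from by decide,
      show PySem.List.pyRange 1 10 1 = ([1, 2, 3, 4, 5, 6, 7, 8, 9] : List Int) from by decide,
      show PySem.List.pyRange 1 11 1 = ([1, 2, 3, 4, 5, 6, 7, 8, 9, 10] : List Int) from by decide,
      show PySem.List.pyRange 1 12 1 = ([1, 2, 3, 4, 5, 6, 7, 8, 9, 10, 11] : List Int) from by decide,
      List.foldl, hA1, hA2, hA3, hA4, hA5, hA6, hA7, hA8, hA9, hA10, hA11] <;>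
    norm_num [pvCum] <;> omega


theorem bYearDown_id (f : Nat) (y doy : Int) (h : 1 ≤ doy) : bYearDown f y doy = (y, doy) := by
  cases f with
  | zero => rfl
  | succ f => simp only [bYearDown]; rw [if_neg (by omega)]


theorem bYearUp_id (f : Nat) (y doy yl : Int) (h : ¬ doy > yl) : bYearUp f y doy yl = (y, doy) := by
  cases f with
  | zero => rfl
  | succ f => simp only [bYearUp]; rw [if_neg h]


theorem bMonthScan_spec (f : Nat) (y : Int) : ∀ (m doy : Int),
    (12 - m).toNat ≤ f → 1 ≤ m → m ≤ 12 → 1 ≤ doy → pvCum y m + doy ≤ pvYearLen y →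
    ∃ m' d', bMonthScan f y m doy = (m', d') ∧
      1 ≤ m' ∧ m' ≤ 12 ∧ 1 ≤ d' ∧ d' ≤ pvDim y m' ∧ pvCum y m' + d' = pvCum y m + doy := by
  induction f with
  | zero =>
    intro m doy hf h1 h2 hlo hhi
    have hm : m = 12 := by omega
    subst hm
    have hstep := pvCum_succ y 12 (by norm_num) le_rfl
    norm_num at hstep
    have hyr := pvCum_year y
    exact ⟨12, doy, rfl, by norm_num, le_rfl, hlo, by omega, rfl⟩
  | succ f ih =>
    intro m doy hf h1 h2 hlo hhi
    have hdim := dim_eq_B y m h1 h2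
    have hdpos := pvDim_pos y m
    simp only [bMonthScan]
    by_cases hgt : doy > dimAlt m y
    · rw [if_pos hgt]
      have hstep := pvCum_succ y m h1 h2
      have hm12 : m < 12 := by
        by_contra hc
        have hm : m = 12 := by omega
        subst hm
        norm_num at hstep
        have hyr := pvCum_year y
        omega
      obtain ⟨m', d', heq, ha, hb, hc, hd, he⟩ :=
        ih (m + 1) (doy - dimAlt m y) (by omega) (by omega) (by omega) (by omega) (by omega)
      exact ⟨m', d', heq, ha, hb, hc, hd, by omega⟩
    · rw [if_neg hgt]
      exact ⟨m, doy, rfl, h1, h2, hlo, by omega, rfl⟩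


-- ===== VERDICT (by name: the statement is the Claim_ definition above) =====
theorem stringifyDate_spec : Claim_equal_stringifyDate := by
  intro year month day _ hpre
  obtain ⟨hlo, hhi⟩ := hpre
  unfold Spec_stringifyDate stringifyDate stringifyDate_alt
  have hmod0 := PySem.Int.mod_nonneg (month - 1) (by norm_num : (0:Int) < 12)
  have hmod12 := PySem.Int.mod_lt (month - 1) (by norm_num : (0:Int) < 12)
  set q := PySem.Int.floordiv (month - 1) 12 with hq
  set r := PySem.Int.mod (month - 1) 12 with hrr
  set y0 := year + q with hy0
  have hml : aMonthLoop (month.natAbs + 2) year month = (y0, r + 1) := by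
    have h := aMonthLoop_eq (month.natAbs + 2) year month (by split_ifs <;> omega)
    rw [h]
  simp only [hml]
  obtain ⟨m1, d1, hA, ha1, ha2, ha3, ha4, ha5⟩ :=
    aDayLoop_spec 24 y0 (r + 1) day (by split_ifs <;> omega) (by omega) (by omega)
      (by omega) (by omega)
  simp only [hA]
  simp only [← hy0]
  have hdoy := bDoy_eq y0 day (r + 1) (by omega) (by omega)
  simp only [hdoy]
  have hdown := bYearDown_id ((day + pvCum y0 (r + 1)).natAbs + 1) y0 (day + pvCum y0 (r + 1)) (by omega)
  simp only [hdown]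
  have hyl : (if PySem.Int.mod y0 4 = 0 then (366:Int) else 365) = pvYearLen y0 := rfl
  simp only [hyl]
  have hup := bYearUp_id ((day + pvCum y0 (r + 1)).natAbs + 1) y0 (day + pvCum y0 (r + 1))
    (pvYearLen y0) (by omega)
  simp only [hup]
  have hc1 := pvCum_one y0
  obtain ⟨m2, d2, hB, hb1, hb2, hb3, hb4, hb5⟩ :=
    bMonthScan_spec 12 y0 1 (day + pvCum y0 (r + 1)) (by norm_num) le_rfl (by norm_num)
      (by omega) (by omega)
  simp only [hB]
  obtain ⟨hm, hd⟩ := dspec_unique y0 m1 d1 m2 d2 ha1 ha2 ha3 ha4 hb1 hb2 hb3 hb4 (by omega)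
  rw [hm, hd]
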